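-- pv_equiv track=rewrite | github.com/yeoeoeonju/BOJautoPush | 프로그래머스/0/120886. A로 B 만들기/A로 B 만들기.py | solution
-- ===== SOURCE A (Python) =====
-- def solution(before, after):
--
--     before = list(before)
--     after = list(after)
--
--     for i in before :
--         if i in after :
--             index = after.index(i)
--             after.pop(index)
--
--     if len(after) > 0 :
--         return 0
--     else :
--         return 1
-- ===== SOURCE B (Python) =====
-- def solution(before, after):
--     cnt = {}
--     for c in before:
--         cnt[c] = cnt.get(c, 0) + 1
--     for c in after:
--         if cnt.get(c, 0) == 0:
--             return 0
--         cnt[c] = cnt[c] - 1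
--     return 1
-- ===== Notes on version B (the rewrite author's own statement) =====
-- stated objective: faster
-- what changed: Replaces A's per-character linear scan of the shrinking 'after' list (membership test, .index, .pop) with a frequency dict built in one pass over 'before' and a consuming early-exit verification pass over 'after'.
import Mathlib
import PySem

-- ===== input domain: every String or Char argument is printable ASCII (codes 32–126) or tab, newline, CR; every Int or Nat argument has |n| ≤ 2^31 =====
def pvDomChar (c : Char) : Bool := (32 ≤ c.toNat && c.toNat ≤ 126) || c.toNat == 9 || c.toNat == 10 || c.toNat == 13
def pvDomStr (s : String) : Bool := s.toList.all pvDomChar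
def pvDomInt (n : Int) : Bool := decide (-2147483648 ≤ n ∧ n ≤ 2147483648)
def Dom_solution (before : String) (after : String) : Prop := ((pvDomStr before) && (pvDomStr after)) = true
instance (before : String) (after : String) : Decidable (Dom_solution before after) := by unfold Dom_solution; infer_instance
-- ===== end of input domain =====

-- B replaces A's O(len(before)*len(after)) repeated .index/.pop scanning of 'after' with a
-- frequency dict built over 'before' and a consuming early-exit pass over 'after' (O(n+m)).

-- ===== PORT A =====
-- one body of A's for-loop: 'if i in after: index = after.index(i); after.pop(index)'
def solAStep (aft : List Char) (i : Char) : List Char :=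
  if i ∈ aft then
    match PySem.List.pop? aft (((PySem.List.index? aft i).getD 0 : Nat) : Int) with
    | some (_, rest) => rest
    | none => aft
  else aft

def solution (before : String) (after : String) : Int :=
  let b := before.toList
  let a := after.toList
  let a := b.foldl solAStep a
  if a.length > 0 then 0 else 1

-- ===== PORT B =====
-- B's verification loop over 'after': early-exit 0 when the count is exhausted
def solGo : List Char → PySem.Dict Char Int → Int
  | [], _ => 1
  | c :: rest, cnt =>
    if cnt.getD c 0 == 0 then 0
    else solGo rest (cnt.insert c (cnt.getD c 0 - 1))

def solution_alt (before : String) (after : String) : Int :=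
  let cnt := before.toList.foldl (fun d c => d.insert c (d.getD c 0 + 1)) PySem.Dict.empty
  solGo after.toList cnt

-- ===== PRECONDITION & SPEC =====
def Spec_solution (before : String) (after : String) (out : Int) : Prop := out = solution_alt before after
instance (before : String) (after : String) (out : Int) : Decidable (Spec_solution before after out) := by unfold Spec_solution; infer_instance

-- ===== CLAIM (what is proved, stated in full; the proofs are below) =====
def Claim_equal_solution : Prop := ∀ (before : String) (after : String), Dom_solution before after → Spec_solution before after (solution before after)

-- ===== LEMMAS AND PROOFS =====

-- erasing at the first index of i is List.erase
theorem eraseIdx_index? (i : Char) : ∀ (aft : List Char) (k : Nat),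
    PySem.List.index? aft i = some k → aft.eraseIdx k = aft.erase i
  | [], k, h => by simp [PySem.List.index?_eq_idxOf?] at h
  | x :: t, k, h => by
    by_cases hx : x = i
    · subst hx
      rw [PySem.List.index?_cons_self] at h
      cases h
      simp [List.eraseIdx]
    · rw [PySem.List.index?_cons_of_ne t hx] at h
      cases hk' : PySem.List.index? t i with
      | none => rw [hk'] at h; simp at h
      | some k' =>
        rw [hk'] at h
        simp only [Option.map_some] at h
        cases h
        have ih := eraseIdx_index? i t k' hk'
        simp [List.eraseIdx, beq_iff_eq, hx, ih]

-- A's loop body erases the first occurrence of i (or nothing)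
theorem solAStep_eq_erase (aft : List Char) (i : Char) : solAStep aft i = aft.erase i := by
  unfold solAStep
  by_cases h : i ∈ aft
  · simp only [if_pos h]
    obtain ⟨k, hk⟩ : ∃ k, PySem.List.index? aft i = some k := by
      have := (PySem.List.index?_isSome_iff (xs := aft) (v := i)).mpr h
      exact Option.isSome_iff_exists.mp this
    obtain ⟨hlt, _, _⟩ := PySem.List.getElem_of_index?_eq_some hk
    rw [hk]
    simp only [Option.getD_some]
    rw [PySem.List.pop?_natCast (h := hlt)]
    exact eraseIdx_index? i aft k hk
  · simp [if_neg h, List.erase_of_not_mem h]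

theorem foldl_solAStep (b a : List Char) : b.foldl solAStep a = a.diff b := by
  rw [List.diff_eq_foldl]
  have : solAStep = List.erase := funext fun aft => funext fun i => solAStep_eq_erase aft i
  rw [this]

theorem diff_nil_iff (a b : List Char) : a.diff b = [] ↔ ∀ c, a.count c ≤ b.count c := by
  constructor
  · intro h c
    have := List.count_diff c a b
    rw [h] at this
    simp at this
    omega
  · intro h
    cases hd : a.diff b with
    | nil => rfl
    | cons c t =>
      have h1 : (a.diff b).count c > 0 := by rw [hd]; simp
      rw [List.count_diff] at h1
      have := h c
      omega

theorem solGo_eq_one (l : List Char) (cnt : PySem.Dict Char Int)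
    (h : ∀ c, (l.count c : Int) ≤ cnt.getD c 0) : solGo l cnt = 1 := by
  induction l generalizing cnt with
  | nil => rfl
  | cons c rest ih =>
    have hc := h c
    rw [List.count_cons_self] at hc
    have hne : ¬ (cnt.getD c 0 == 0) = true := by
      simp only [beq_iff_eq]
      push_cast at hc
      omega
    rw [solGo, if_neg hne]
    apply ih
    intro c'
    rw [PySem.Dict.getD_insert]
    by_cases hcc : c' = c
    · subst hcc
      push_cast at hc ⊢
      omega
    · rw [if_neg hcc]
      have := h c'
      rw [List.count_cons_of_ne (fun h => hcc h.symm)] at this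
      exact this

theorem solGo_eq_zero (l : List Char) (cnt : PySem.Dict Char Int)
    (hnn : ∀ c, 0 ≤ cnt.getD c 0)
    (h : ∃ c, cnt.getD c 0 < (l.count c : Int)) : solGo l cnt = 0 := by
  induction l generalizing cnt with
  | nil =>
    obtain ⟨c, hc⟩ := h
    simp at hc
    exact absurd hc (not_lt.mpr (hnn c))
  | cons c rest ih =>
    by_cases h0 : (cnt.getD c 0 == 0) = true
    · rw [solGo, if_pos h0]
    · rw [solGo, if_neg h0]
      simp only [beq_iff_eq] at h0
      have hcpos : 1 ≤ cnt.getD c 0 := by have := hnn c; omega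
      apply ih
      · intro c'
        rw [PySem.Dict.getD_insert]
        by_cases hcc : c' = c
        · rw [if_pos hcc]; omega
        · rw [if_neg hcc]; exact hnn c'
      · obtain ⟨c₀, hc₀⟩ := h
        refine ⟨c₀, ?_⟩
        rw [PySem.Dict.getD_insert]
        by_cases hcc : c₀ = c
        · subst hcc
          rw [if_pos rfl, List.count_cons_self] at *
          push_cast at hc₀ ⊢
          omega
        · rw [if_neg hcc]
          rw [List.count_cons_of_ne (fun h => hcc h.symm)] at hc₀
          exact hc₀

theorem cnt_getD (b : List Char) (c : Char) :
    (b.foldl (fun d c => d.insert c (d.getD c 0 + 1)) PySem.Dict.empty).getD c 0 = (b.count c : Int) := by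
  rw [PySem.Dict.getD_foldl_insert_add_one]
  simp [PySem.Dict.getD_empty]

-- ===== VERDICT (by name: the statement is the Claim_ definition above) =====
theorem solution_spec : Claim_equal_solution := by
  unfold Claim_equal_solution
  intro before after _
  unfold Spec_solution solution solution_alt
  simp only [foldl_solAStep]
  set a := after.toList
  set b := before.toList
  by_cases h : ∀ c, a.count c ≤ b.count c
  · rw [if_neg (by rw [(diff_nil_iff a b).mpr h]; simp)]
    rw [solGo_eq_one]
    intro c
    rw [cnt_getD]
    exact_mod_cast h c
  · have hne : a.diff b ≠ [] := fun hd => h ((diff_nil_iff a b).mp hd)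
    rw [if_pos (by simpa [List.length_pos_iff] using hne)]
    rw [solGo_eq_zero]
    · intro c; rw [cnt_getD]; positivity
    · push Not at h
      obtain ⟨c, hc⟩ := h
      exact ⟨c, by rw [cnt_getD]; exact_mod_cast hc⟩
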